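-- pv_equiv track=rewrite | github.com/pin705/cultivation-world-simulator | src/classes/items/auxiliary.py | get_ten_thousand_souls_banner_bonus
-- ===== SOURCE A (Python) =====
-- def get_ten_thousand_souls_banner_bonus(souls: int) -> int:
--     thresholds = [
--         (90_000, 8),
--         (70_000, 7),
--         (50_000, 6),
--         (30_000, 5),
--         (15_000, 4),
--         (7_000, 3),
--         (3_000, 2),
--         (1_000, 1),
--     ]
--     for minimum_souls, bonus in thresholds:
--         if souls >= minimum_souls:
--             return bonus
--     return 0
-- ===== SOURCE B (Python) =====
-- import bisect
--
-- _THRESHOLDS = [1000, 3000, 7000, 15000, 30000, 50000, 70000, 90000]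
--
-- def get_ten_thousand_souls_banner_bonus(souls: int) -> int:
--     return bisect.bisect_right(_THRESHOLDS, souls)
-- ===== Notes on version B (the rewrite author's own statement) =====
-- stated objective: idiomatic
-- what changed: Replaces the descending early-return scan over (threshold,bonus) pairs with bisect_right binary search on the ascending threshold list, returning the rank directly.
import Mathlib
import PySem

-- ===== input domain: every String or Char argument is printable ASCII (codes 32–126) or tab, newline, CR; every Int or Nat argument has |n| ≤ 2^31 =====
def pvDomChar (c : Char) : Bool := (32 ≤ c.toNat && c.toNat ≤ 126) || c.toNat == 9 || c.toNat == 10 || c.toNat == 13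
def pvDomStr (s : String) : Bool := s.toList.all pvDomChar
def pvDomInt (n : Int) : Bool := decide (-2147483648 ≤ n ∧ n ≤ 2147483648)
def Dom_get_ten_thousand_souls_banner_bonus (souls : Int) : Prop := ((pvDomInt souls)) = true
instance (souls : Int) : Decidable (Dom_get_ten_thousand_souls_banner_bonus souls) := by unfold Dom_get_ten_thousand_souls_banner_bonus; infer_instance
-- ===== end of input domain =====

-- B replaces A's descending early-return scan with bisect_right binary search on the ascending threshold list (idiomatic).

-- ===== PORT A =====
-- A's descending (threshold, bonus) table, scanned with early return.
def pvScanA : List (Int × Int) → Int → Int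
  | [], _ => 0
  | (m, b) :: rest, souls => if souls ≥ m then b else pvScanA rest souls

def get_ten_thousand_souls_banner_bonus (souls : Int) : Int :=
  pvScanA [(90000, 8), (70000, 7), (50000, 6), (30000, 5),
           (15000, 4), (7000, 3), (3000, 2), (1000, 1)] souls

-- ===== PORT B =====
-- bisect.bisect_right: while lo < hi: mid=(lo+hi)//2; if x < a[mid]: hi=mid else lo=mid+1; return lo.
-- fuel is only a totality guard (8 ≥ list length suffices).
def pvBisectRight (fuel : Nat) (a : List Int) (x : Int) (lo hi : Nat) : Nat :=
  match fuel with
  | 0 => lo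
  | f + 1 =>
    if lo < hi then
      let mid := (lo + hi) / 2
      if x < a.getD mid 0 then pvBisectRight f a x lo mid
      else pvBisectRight f a x (mid + 1) hi
    else lo

def pvThresholdsB : List Int := [1000, 3000, 7000, 15000, 30000, 50000, 70000, 90000]

def get_ten_thousand_souls_banner_bonus_alt (souls : Int) : Int :=
  Int.ofNat (pvBisectRight 8 pvThresholdsB souls 0 pvThresholdsB.length)

-- ===== PRECONDITION & SPEC =====
def Spec_get_ten_thousand_souls_banner_bonus (souls : Int) (out : Int) : Prop := out = get_ten_thousand_souls_banner_bonus_alt souls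
instance (souls : Int) (out : Int) : Decidable (Spec_get_ten_thousand_souls_banner_bonus souls out) := by unfold Spec_get_ten_thousand_souls_banner_bonus; infer_instance

-- ===== CLAIM (what is proved, stated in full; the proofs are below) =====
def Claim_equal_get_ten_thousand_souls_banner_bonus : Prop := ∀ (souls : Int), Dom_get_ten_thousand_souls_banner_bonus souls → Spec_get_ten_thousand_souls_banner_bonus souls (get_ten_thousand_souls_banner_bonus souls)

-- ===== LEMMAS AND PROOFS =====

-- ===== VERDICT (by name: the statement is the Claim_ definition above) =====
theorem get_ten_thousand_souls_banner_bonus_spec : Claim_equal_get_ten_thousand_souls_banner_bonus := by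
  intro souls _
  unfold Spec_get_ten_thousand_souls_banner_bonus get_ten_thousand_souls_banner_bonus
    get_ten_thousand_souls_banner_bonus_alt
  simp only [pvScanA, pvBisectRight, pvThresholdsB, List.length_cons, List.length_nil,
    Nat.reduceAdd, Nat.reduceDiv, Nat.reduceLT, List.getD_cons_succ, List.getD_cons_zero,
    reduceIte, Int.ofNat_eq_natCast]
  split_ifs <;> omega
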